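-- pv_equiv track=rewrite | github.com/Dhruv-Panwala/Health-Workers-Assistant-Project | pocketflow-text2sql/nodes.py | _schema_identifiers
-- ===== SOURCE A (Python) =====
-- def _parse_schema_blocks(schema_text):
--     table_blocks = {}
--     relationships = []
--     notes = []
--     current_table = None
--     current_lines = []
--     mode = None
--
--     for line in schema_text.splitlines():
--         if line.startswith("Table: "):
--             if current_table:
--                 table_blocks[current_table] = current_lines
--             current_table = line.split(": ", 1)[1].strip()
--             current_lines = [line]
--             mode = "table"
--         elif line == "Relationships:":
--             if current_table:
--                 table_blocks[current_table] = current_lines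
--                 current_table = None
--             mode = "relationships"
--         elif line == "Notes:":
--             if current_table:
--                 table_blocks[current_table] = current_lines
--                 current_table = None
--             mode = "notes"
--         else:
--             if mode == "table" and current_table:
--                 current_lines.append(line)
--             elif mode == "relationships" and line:
--                 relationships.append(line)
--             elif mode == "notes" and line:
--                 notes.append(line)
--
--     if current_table:
--         table_blocks[current_table] = current_lines
--
--     return table_blocks, relationships, notes
--
-- def _schema_identifiers(schema_text):
--     table_blocks, _, _ = _parse_schema_blocks(schema_text)
--     table_names = {table_name.lower(): table_name for table_name in table_blocks}
--     column_names = {}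
--     table_columns = {}
--
--     for table_name, lines in table_blocks.items():
--         current_table_columns = {}
--         for line in lines:
--             if line.startswith("  - "):
--                 column_name = line[4:].split(" (", 1)[0].strip()
--                 column_names[column_name.lower()] = column_name
--                 current_table_columns[column_name.lower()] = column_name
--         table_columns[table_name] = current_table_columns
--
--     return table_names, column_names, table_columns
-- ===== SOURCE B (Python) =====
-- def _schema_identifiers(schema_text):
--     # Single pass: build table_columns directly while scanninglines; derive
--     # table_names and column_names from the final table_columns afterwards.
--     table_columns = {}
--     current_table = None
--     mode = None
--
--     for line in schema_text.splitlines():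
--         if line.startswith("Table: "):
--             current_table = line.split(": ", 1)[1].strip()
--             if current_table:
--                 table_columns[current_table] = {}
--             mode = "table"
--         elif line == "Relationships:":
--             current_table = None
--             mode = "relationships"
--         elif line == "Notes:":
--             current_table = None
--             mode = "notes"
--         elif mode == "table" and current_table and line.startswith("  - "):
--             column_name = line[4:].split(" (", 1)[0].strip()
--             table_columns[current_table][column_name.lower()] = column_name
--
--     table_names = {t.lower(): t for t in table_columns}
--     column_names = {}
--     for cols in table_columns.values():
--         for key, name in cols.items():
--             column_names[key] = name
--
--     return table_names, column_names, table_columns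
-- ===== Notes on version B (the rewrite author's own statement) =====
-- stated objective: alternative
-- what changed: A collects per-table line blocks in a dict and then re-scans every block's lines a second time to build the three maps; B parses in a single pass, building table_columns directly line by line, and derives table_names and column_names from the finished table_columns, eliminating the intermediate list-of-lines structure and the second scan.
import Mathlib
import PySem

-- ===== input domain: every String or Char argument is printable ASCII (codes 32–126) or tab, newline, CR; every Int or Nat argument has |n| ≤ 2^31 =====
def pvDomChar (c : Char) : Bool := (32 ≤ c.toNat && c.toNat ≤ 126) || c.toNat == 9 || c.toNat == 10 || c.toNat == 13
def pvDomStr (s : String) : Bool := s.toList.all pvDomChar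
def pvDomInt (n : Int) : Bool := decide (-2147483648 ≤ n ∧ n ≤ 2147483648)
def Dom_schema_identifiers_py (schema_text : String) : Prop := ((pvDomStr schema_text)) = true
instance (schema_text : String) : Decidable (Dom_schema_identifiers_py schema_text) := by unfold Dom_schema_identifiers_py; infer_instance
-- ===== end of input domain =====

-- B replaces A's two-phase parse (collect per-table line blocks, then re-scan each block)
-- by a single pass that builds table_columns directly and derives the two name maps from it.

-- ===== PORT A =====
-- shared parsing helpers (both Pythons contain these identical expressions)
-- line.split(": ", 1)[1].strip(); the [1] always exists in the branch where it is used
-- (the line starts with "Table: "), so the .getD defaults are never taken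
def pvParseTable (line : String) : String :=
  PySem.Str.strip (((PySem.Str.splitMax? line ": " 1).getD []).getD 1 "")

-- line[4:].split(" (", 1)[0].strip(); [0] of a split always exists
def pvParseCol (line : String) : String :=
  PySem.Str.strip (((PySem.Str.splitMax? (PySem.Str.slice line (some 4) none) " (" 1).getD []).getD 0 "")

-- Python truthiness of current_table (None or "" are falsy)
def pvTruthy : Option String → Bool
  | none => false
  | some t => !(t == "")

-- loop state of _parse_schema_blocks
structure PvStA where
  tb : PySem.Dict String (List String)
  rels : List String
  notes : List String
  ct : Option String
  cl : List String
  mode : Option String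

-- 'if current_table: table_blocks[current_table] = current_lines'
def pvSave (tb : PySem.Dict String (List String)) (ct : Option String) (cl : List String) :
    PySem.Dict String (List String) :=
  match ct with
  | some t => if t = "" then tb else tb.insert t cl
  | none => tb

def pvStepA (st : PvStA) (line : String) : PvStA :=
  if PySem.Str.startswith line "Table: " then
    { tb := pvSave st.tb st.ct st.cl, rels := st.rels, notes := st.notes,
      ct := some (pvParseTable line), cl := [line], mode := some "table" }
  else if line = "Relationships:" then
    { st with tb := pvSave st.tb st.ct st.cl,
              ct := if pvTruthy st.ct then none else st.ct, mode := some "relationships" }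
  else if line = "Notes:" then
    { st with tb := pvSave st.tb st.ct st.cl,
              ct := if pvTruthy st.ct then none else st.ct, mode := some "notes" }
  else
    if st.mode == some "table" && pvTruthy st.ct then { st with cl := st.cl ++ [line] }
    else if st.mode == some "relationships" && !(line == "") then { st with rels := st.rels ++ [line] }
    else if st.mode == some "notes" && !(line == "") then { st with notes := st.notes ++ [line] }
    else st

def pvParseBlocks (schema_text : String) :
    PySem.Dict String (List String) × List String × List String :=
  let st := (PySem.Str.splitlines schema_text).foldl pvStepA
    { tb := PySem.Dict.empty, rels := [], notes := [], ct := none, cl := [], mode := none }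
  (pvSave st.tb st.ct st.cl, st.rels, st.notes)

def schema_identifiers_py (schema_text : String) :
    (List (String × String)) × (List (String × String)) × (List (String × List (String × String))) :=
  let table_blocks := (pvParseBlocks schema_text).1
  let table_names := table_blocks.keys.foldl
    (fun d t => d.insert (PySem.Str.lower t) t) PySem.Dict.empty
  let res := table_blocks.items.foldl
    (fun (acc : PySem.Dict String String × PySem.Dict String (PySem.Dict String String)) p =>
      let inner := p.2.foldl
        (fun (a : PySem.Dict String String × PySem.Dict String String) line =>
          if PySem.Str.startswith line "  - " then
            let c := pvParseCol line
            (a.1.insert (PySem.Str.lower c) c, a.2.insert (PySem.Str.lower c) c)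
          else a)
        (acc.1, PySem.Dict.empty)
      (inner.1, acc.2.insert p.1 inner.2))
    (PySem.Dict.empty, PySem.Dict.empty)
  (table_names.items, res.1.items, res.2.items.map (fun q => (q.1, q.2.items)))

-- ===== PORT B =====
structure PvStB where
  tc : PySem.Dict String (PySem.Dict String String)
  ct : Option String
  mode : Option String

def pvStepB (st : PvStB) (line : String) : PvStB :=
  if PySem.Str.startswith line "Table: " then
    { tc := if pvParseTable line = "" then st.tc
            else st.tc.insert (pvParseTable line) PySem.Dict.empty,
      ct := some (pvParseTable line), mode := some "table" }
  else if line = "Relationships:" then { st with ct := none, mode := some "relationships" }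
  else if line = "Notes:" then { st with ct := none, mode := some "notes" }
  -- 'mode == "table" and current_table and line.startswith("  - ")'; current_table's
  -- Python truthiness (None and "" falsy) is rendered as st.ct.getD "" ≠ ""
  else if st.mode == some "table" && !(st.ct.getD "" == "")
          && PySem.Str.startswith line "  - " then
    { st with tc := (st.tc.modify (st.ct.getD "") PySem.Dict.empty
        (fun d => d.insert (PySem.Str.lower (pvParseCol line)) (pvParseCol line))) }
  else st

def schema_identifiers_py_alt (schema_text : String) :
    (List (String × String)) × (List (String × String)) × (List (String × List (String × String))) :=
  let st := (PySem.Str.splitlines schema_text).foldl pvStepB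
    { tc := PySem.Dict.empty, ct := none, mode := none }
  let table_names := st.tc.keys.foldl
    (fun d t => d.insert (PySem.Str.lower t) t) PySem.Dict.empty
  let column_names := st.tc.values.foldl
    (fun cn cols => cols.items.foldl (fun cn q => cn.insert q.1 q.2) cn) PySem.Dict.empty
  (table_names.items, column_names.items, st.tc.items.map (fun q => (q.1, q.2.items)))

-- ===== PRECONDITION & SPEC =====
def Spec_schema_identifiers_py (schema_text : String) (out : (List (String × String)) × (List (String × String)) × (List (String × List (String × String)))) : Prop := out = schema_identifiers_py_alt schema_text
instance (schema_text : String) (out : (List (String × String)) × (List (String × String)) × (List (String × List (String × String)))) : Decidable (Spec_schema_identifiers_py schema_text out) := by unfold Spec_schema_identifiers_py; infer_instance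

-- ===== CLAIM (what is proved, stated in full; the proofs are below) =====
def Claim_equal_schema_identifiers_py : Prop := ∀ (schema_text : String), Dom_schema_identifiers_py schema_text → Spec_schema_identifiers_py schema_text (schema_identifiers_py schema_text)

-- ===== LEMMAS AND PROOFS =====

-- the column (key, name) pairs A's second phase extracts from a block's lines
def pvPairs (lines : List String) : List (String × String) :=
  (lines.filter (fun l => PySem.Str.startswith l "  - ")).map
    (fun l => (PySem.Str.lower (pvParseCol l), pvParseCol l))

-- what B's table_columns is, as a function of A's table_blocks
def pvColsOf (d : PySem.Dict String (List String)) :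
    PySem.Dict String (PySem.Dict String String) :=
  ⟨d.items.map (fun p => (p.1, PySem.Dict.ofList (pvPairs p.2)))⟩

-- normalised current_table: A may hold 'some ""' where B holds 'none'; both are falsy
def pvCtN : Option String → Option String
  | none => none
  | some t => if t = "" then none else some t

def pvInv (sa : PvStA) (sb : PvStB) : Prop :=
  sb.mode = sa.mode ∧ pvCtN sb.ct = pvCtN sa.ct ∧
  sb.tc = pvColsOf (pvSave sa.tb sa.ct sa.cl) ∧
  (pvSave sa.tb sa.ct sa.cl).keys.Nodup

theorem pvKeys_colsOf (d : PySem.Dict String (List String)) : (pvColsOf d).keys = d.keys := by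
  simp [pvColsOf, PySem.Dict.keys, List.map_map, Function.comp]

theorem pvContains_colsOf (d : PySem.Dict String (List String)) (k : String) :
    (pvColsOf d).contains k = d.contains k := by
  simp only [pvColsOf, PySem.Dict.contains, List.any_map]
  rfl

theorem pvColsOf_insert (d : PySem.Dict String (List String)) (k : String) (v : List String) :
    pvColsOf (d.insert k v) = (pvColsOf d).insert k (PySem.Dict.ofList (pvPairs v)) := by
  unfold PySem.Dict.insert
  rw [pvContains_colsOf]
  by_cases h : d.contains k = true
  · simp only [h, if_true]
    apply PySem.Dict.ext
    show List.map _ (List.map _ d.items) = List.map _ (List.map _ d.items)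
    simp only [List.map_map]
    apply List.map_congr_left
    intro p _
    by_cases hp : p.1 == k <;> simp_all [Function.comp]
  · simp only [h]
    apply PySem.Dict.ext
    show List.map _ (d.items ++ [(k, v)]) = List.map _ d.items ++ [(k, _)]
    simp

-- a "Table: " header line is not a "  - " column line
theorem pvStarts_table_not_col (l : String) (h : PySem.Str.startswith l "Table: " = true) :
    PySem.Str.startswith l "  - " = false := by
  simp only [PySem.Str.startswith, PySem.Chars.startswith] at h ⊢
  rw [List.isPrefixOf_iff_prefix] at h
  rw [Bool.eq_false_iff, ne_eq, List.isPrefixOf_iff_prefix]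
  obtain ⟨t, ht⟩ := h
  intro hcon
  obtain ⟨u, hu⟩ := hcon
  rw [← ht] at hu
  have h1 : "  - ".toList = [' ', ' ', '-', ' '] := rfl
  have h2 : "Table: ".toList = ['T', 'a', 'b', 'l', 'e', ':', ' '] := rfl
  rw [h1, h2] at hu
  simp at hu

-- inserting at a key j ≠ k commutes past an insert at a PRESENT key k
theorem pvInsert_comm {ν : Type} (d : PySem.Dict String ν) (k j : String) (v w : ν)
    (hne : j ≠ k) (hk : d.contains k = true) :
    (d.insert k v).insert j w = (d.insert j w).insert k v := by
  have hkj : (d.insert j w).contains k = true := by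
    rw [PySem.Dict.contains_insert]; simp [hk]
  have hjk : (d.insert k v).contains j = d.contains j := by
    rw [PySem.Dict.contains_insert]; simp [hne]
  apply PySem.Dict.ext
  by_cases hj : d.contains j = true
  · rw [PySem.Dict.items_insert, hjk, hj, if_pos rfl,
        PySem.Dict.items_insert _ k v, hk, if_pos rfl,
        PySem.Dict.items_insert _ k v, hkj, if_pos rfl,
        PySem.Dict.items_insert _ j w, hj, if_pos rfl,
        List.map_map, List.map_map]
    apply List.map_congr_left
    intro p _
    by_cases hpk : p.1 = k
    · simp [Function.comp, hpk, Ne.symm hne]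
    · by_cases hpj : p.1 = j <;> simp [Function.comp, hpk, hpj, hne]
  · rw [PySem.Dict.items_insert, hjk, if_neg (by simp [hj]),
        PySem.Dict.items_insert _ k v, hk, if_pos rfl,
        PySem.Dict.items_insert _ k v, hkj, if_pos rfl,
        PySem.Dict.items_insert _ j w, if_neg (by simp [hj]),
        List.map_append]
    simp [hne]

theorem pvUpdate_cons {ν : Type} (d : PySem.Dict String ν) (p : String × ν) (tl : List (String × ν)) :
    d.update (p :: tl) = (d.insert p.1 p.2).update tl := rfl

theorem pvUpdate_insert_comm {ν : Type} (rest : List (String × ν)) (d : PySem.Dict String ν)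
    (k : String) (v : ν) (hrest : ∀ p ∈ rest, p.1 ≠ k) (hk : d.contains k = true) :
    (d.insert k v).update rest = (d.update rest).insert k v := by
  induction rest generalizing d with
  | nil => rfl
  | cons p tl ih =>
      rw [pvUpdate_cons, pvUpdate_cons,
          pvInsert_comm d k p.1 v p.2 (hrest p (List.mem_cons_self)) hk,
          ih (d.insert p.1 p.2) (fun q hq => hrest q (List.mem_cons_of_mem _ hq))
            (by rw [PySem.Dict.contains_insert]; simp [hk])]

theorem pvUpdate_map_replace {ν : Type} (l : List (String × ν)) (d : PySem.Dict String ν)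
    (k : String) (v : ν) (hnd : (l.map Prod.fst).Nodup) (hk : k ∈ l.map Prod.fst) :
    d.update (l.map (fun p => if p.1 == k then (k, v) else p)) = (d.update l).insert k v := by
  induction l generalizing d with
  | nil => simp at hk
  | cons p tl ih =>
      simp only [List.map_cons, List.nodup_cons, List.mem_cons] at hnd hk
      by_cases hp : p.1 = k
      · have htl : ∀ q ∈ tl, q.1 ≠ k := by
          intro q hq hqk
          exact hnd.1 (List.mem_map.mpr ⟨q, hq, hqk.trans hp.symm⟩)
        have hmap : tl.map (fun p => if p.1 == k then (k, v) else p) = tl := by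
          apply List.map_congr_left ?_ |>.trans tl.map_id
          intro q hq
          simp [htl q hq]
        rw [List.map_cons, hmap, if_pos (by simp [hp]), pvUpdate_cons, pvUpdate_cons]
        have h1 : d.insert k v = (d.insert p.1 p.2).insert k v := by
          rw [hp, PySem.Dict.insert_insert_self]
        rw [h1, pvUpdate_insert_comm tl _ k v htl
          (by rw [hp, PySem.Dict.contains_insert_self])]
      · have hk' : k ∈ tl.map Prod.fst := by
          rcases hk with hk | hk
          · exact absurd hk.symm hp
          · exact hk
        rw [List.map_cons, if_neg (by simp [hp]), pvUpdate_cons, pvUpdate_cons]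
        exact ih (d.insert p.1 p.2) hnd.2 hk'

theorem pvUpdate_items_insert {ν : Type} (e d : PySem.Dict String ν) (k : String) (v : ν)
    (hnd : e.keys.Nodup) :
    d.update ((e.insert k v).items) = (d.update e.items).insert k v := by
  rw [PySem.Dict.items_insert]
  by_cases h : e.contains k = true
  · rw [if_pos h]
    exact pvUpdate_map_replace e.items d k v hnd
      (by rw [PySem.Dict.contains_eq_decide_mem_keys] at h; simpa [PySem.Dict.keys] using h)
  · rw [if_neg h, PySem.Dict.update, List.foldl_append]
    rfl

theorem pvUpdate_items_update {ν : Type} (ps : List (String × ν)) (e d : PySem.Dict String ν)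
    (hnd : e.keys.Nodup) :
    d.update ((e.update ps).items) = (d.update e.items).update ps := by
  induction ps generalizing e d with
  | nil => rfl
  | cons q tl ih =>
      rw [pvUpdate_cons, pvUpdate_cons, ← pvUpdate_items_insert e d q.1 q.2 hnd]
      exact ih (e.insert q.1 q.2) d (PySem.Dict.nodup_keys_insert _ _ _ hnd)

-- the crux: updating with a raw pair sequence = updating with its dict-deduped items
theorem pvUpdate_ofList_items {ν : Type} (ps : List (String × ν)) (d : PySem.Dict String ν) :
    d.update ((PySem.Dict.ofList ps).items) = d.update ps := by
  have := pvUpdate_items_update ps PySem.Dict.empty d PySem.Dict.nodup_keys_empty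
  simpa [PySem.Dict.ofList] using this

-- A's inner per-block loop, as an update by pvPairs on both components
theorem pvPairs_cons (l : String) (t : List String) :
    pvPairs (l :: t) = if PySem.Str.startswith l "  - " = true
      then (PySem.Str.lower (pvParseCol l), pvParseCol l) :: pvPairs t else pvPairs t := by
  simp only [pvPairs, List.filter_cons]
  split <;> simp_all

theorem pvPairs_append_singleton (t : List String) (l : String) :
    pvPairs (t ++ [l]) = pvPairs t ++ pvPairs [l] := by
  simp [pvPairs]

-- A's inner per-block loop, as an update by pvPairs on both components
theorem pvInnerA (lines : List String) (cn cur : PySem.Dict String String) :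
    lines.foldl
      (fun (a : PySem.Dict String String × PySem.Dict String String) line =>
        if PySem.Str.startswith line "  - " then
          (a.1.insert (PySem.Str.lower (pvParseCol line)) (pvParseCol line),
           a.2.insert (PySem.Str.lower (pvParseCol line)) (pvParseCol line))
        else a) (cn, cur)
    = (cn.update (pvPairs lines), cur.update (pvPairs lines)) := by
  induction lines generalizing cn cur with
  | nil => rfl
  | cons l t ih =>
      rw [List.foldl_cons, pvPairs_cons]
      by_cases hl : PySem.Str.startswith l "  - " = true
      · rw [if_pos hl, if_pos hl, ih, pvUpdate_cons, pvUpdate_cons]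
      · rw [if_neg hl, if_neg hl, ih]

theorem pvCtN_some_iff (o : Option String) (t : String) :
    pvCtN o = some t ↔ o = some t ∧ t ≠ "" := by
  cases o with
  | none => simp [pvCtN]
  | some u =>
      by_cases hu : u = ""
      · simp only [pvCtN, hu, if_true]
        constructor
        · intro h; cases h
        · rintro ⟨h, hne⟩; cases h; exact absurd rfl hne
      · simp only [pvCtN, if_neg hu, Option.some.injEq, ne_eq]
        constructor
        · intro h; exact ⟨h, h ▸ hu⟩
        · exact fun h => h.1

theorem pvTruthy_eq (o : Option String) : pvTruthy o = (pvCtN o).isSome := by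
  cases o with
  | none => rfl
  | some u => by_cases hu : u = "" <;> simp [pvTruthy, pvCtN, hu]

theorem pvSave_falsy (tb : PySem.Dict String (List String)) (ct : Option String)
    (cl : List String) (h : pvTruthy ct = false) : pvSave tb ct cl = tb := by
  cases ct with
  | none => rfl
  | some u =>
      have hu : u = "" := by simpa [pvTruthy] using h
      simp [pvSave, hu]

theorem pvSave_some (tb : PySem.Dict String (List String)) (t : String) (cl : List String) :
    pvSave tb (some t) cl = if t = "" then tb else tb.insert t cl := rfl

theorem pvCtN_close (ct : Option String) :
    pvCtN (if pvTruthy ct then none else ct) = none := by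
  by_cases h : pvTruthy ct = true
  · simp [h, pvCtN]
  · rw [if_neg h]
    rw [pvTruthy_eq] at h
    cases hc : pvCtN ct with
    | none => rfl
    | some t => rw [hc] at h; simp at h

theorem pvSave_close (tb : PySem.Dict String (List String)) (ct : Option String)
    (cl cl' : List String) :
    pvSave (pvSave tb ct cl) (if pvTruthy ct then none else ct) cl' = pvSave tb ct cl := by
  by_cases h : pvTruthy ct = true
  · rw [if_pos h]; rfl
  · rw [if_neg h, pvSave_falsy _ _ _ (by simpa using h)]

theorem pvKeys_insert_val {ν : Type} (d : PySem.Dict String ν) (k : String) (v w : ν) :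
    (d.insert k v).keys = (d.insert k w).keys := by
  unfold PySem.Dict.insert
  by_cases h : d.contains k = true <;> simp only [h, if_true, if_false, Bool.false_eq_true]
  · simp only [PySem.Dict.keys, List.map_map]
    apply List.map_congr_left
    intro p _
    by_cases hp : p.1 == k <;> simp_all [Function.comp]
  · simp [PySem.Dict.keys]

theorem pvModify_insert {ν : Type} (d : PySem.Dict String ν) (k : String) (v dflt : ν)
    (f : ν → ν) : (d.insert k v).modify k dflt f = d.insert k (f v) := by
  rw [PySem.Dict.modify, PySem.Dict.getD_insert_self, PySem.Dict.insert_insert_self]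

theorem pvOfList_append_singleton {ν : Type} (ps : List (String × ν)) (q : String × ν) :
    PySem.Dict.ofList (ps ++ [q]) = (PySem.Dict.ofList ps).insert q.1 q.2 := by
  simp [PySem.Dict.ofList, PySem.Dict.update, List.foldl_append]

theorem pvCtN_some_inv (o : Option String) (t : String) (h : pvCtN o = some t) :
    o = some t ∧ t ≠ "" := (pvCtN_some_iff o t).mp h

theorem pvStep_inv (sa : PvStA) (sb : PvStB) (line : String) (h : pvInv sa sb) :
    pvInv (pvStepA sa line) (pvStepB sb line) := by
  obtain ⟨hm, hct, htc, hnd⟩ := h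
  unfold pvStepA pvStepB
  by_cases h1 : PySem.Str.startswith line "Table: " = true
  · rw [if_pos h1, if_pos h1]
    have hp1 : pvPairs [line] = [] := by
      rw [pvPairs_cons, if_neg]
      · rfl
      · simp only [pvStarts_table_not_col line h1, Bool.false_eq_true, not_false_eq_true]
    show pvInv _ _
    rw [pvInv, pvSave_some]
    by_cases ht : pvParseTable line = ""
    · rw [if_pos ht, if_pos ht]
      exact ⟨rfl, rfl, htc, hnd⟩
    · rw [if_neg ht, if_neg ht]
      refine ⟨rfl, rfl, ?_, ?_⟩
      · rw [pvColsOf_insert, htc, hp1]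
        rfl
      · exact PySem.Dict.nodup_keys_insert _ _ _ hnd
  · rw [if_neg h1, if_neg h1]
    by_cases h2 : line = "Relationships:"
    · rw [if_pos h2, if_pos h2]
      exact ⟨rfl, by rw [pvCtN_close]; rfl,
        by rw [pvSave_close]; exact htc, by rw [pvSave_close]; exact hnd⟩
    · rw [if_neg h2, if_neg h2]
      by_cases h3 : line = "Notes:"
      · rw [if_pos h3, if_pos h3]
        exact ⟨rfl, by rw [pvCtN_close]; rfl,
          by rw [pvSave_close]; exact htc, by rw [pvSave_close]; exact hnd⟩
      · rw [if_neg h3, if_neg h3]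
        have hgb : sb.ct.getD "" = (pvCtN sb.ct).getD "" := by
          cases sb.ct with
          | none => rfl
          | some u => by_cases hu : u = "" <;> simp [pvCtN, hu]
        cases hctn : pvCtN sa.ct with
        | none =>
            have htr : pvTruthy sa.ct = false := by rw [pvTruthy_eq, hctn]; rfl
            have hg : sb.ct.getD "" = "" := by rw [hgb, hct, hctn]; rfl
            rw [if_neg (by simp [htr] : ¬ (sa.mode == some "table" && pvTruthy sa.ct) = true),
                if_neg (by simp [hg] : ¬ (sb.mode == some "table" && !(sb.ct.getD "" == "")
                  && PySem.Str.startswith line "  - ") = true)]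
            split <;> try split
            all_goals exact ⟨hm, hct, htc, hnd⟩
        | some u =>
            obtain ⟨hsa, hu⟩ := pvCtN_some_inv _ _ hctn
            have htr : pvTruthy sa.ct = true := by rw [pvTruthy_eq, hctn]; rfl
            have hg : sb.ct.getD "" = u := by rw [hgb, hct, hctn]; rfl
            have hsave' : ∀ cl', pvSave sa.tb sa.ct cl' = sa.tb.insert u cl' := by
              intro cl'; simp [pvSave, hsa, hu]
            by_cases hmode : sa.mode = some "table"
            · rw [if_pos (by simp [hmode, htr] :
                  (sa.mode == some "table" && pvTruthy sa.ct) = true)]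
              by_cases hs : PySem.Str.startswith line "  - " = true
              · have hs2 : PySem.Chars.startswith line.toList [' ', ' ', '-', ' '] = true := hs
                rw [if_pos (by simp [hm, hmode, hg, hu, hs2] : (sb.mode == some "table"
                    && !(sb.ct.getD "" == "") && PySem.Str.startswith line "  - ") = true)]
                refine ⟨hm, hct, ?_, ?_⟩
                · dsimp only
                  rw [hg, hsave' (sa.cl ++ [line]), pvColsOf_insert, htc, hsave' sa.cl,
                      pvColsOf_insert, pvModify_insert, pvPairs_append_singleton,
                      pvPairs_cons, if_pos hs]
                  show _ = (pvColsOf sa.tb).insert u (PySem.Dict.ofList (pvPairs sa.cl ++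
                    [(PySem.Str.lower (pvParseCol line), pvParseCol line)]))
                  rw [pvOfList_append_singleton]
                · dsimp only
                  rw [hsave' (sa.cl ++ [line]),
                      pvKeys_insert_val sa.tb u (sa.cl ++ [line]) sa.cl, ← hsave' sa.cl]
                  exact hnd
              · have hs2 : PySem.Str.startswith line "  - " = false := by simpa using hs
                have hs3 : PySem.Chars.startswith line.toList [' ', ' ', '-', ' '] = false := hs2
                rw [if_neg (by simp [hs3] : ¬ (sb.mode == some "table"
                    && !(sb.ct.getD "" == "") && PySem.Str.startswith line "  - ") = true)]
                refine ⟨hm, hct, ?_, ?_⟩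
                · dsimp only
                  rw [hsave' (sa.cl ++ [line]), pvColsOf_insert, htc, hsave' sa.cl,
                      pvColsOf_insert, pvPairs_append_singleton, pvPairs_cons, if_neg hs]
                  simp [pvPairs]
                · dsimp only
                  rw [hsave' (sa.cl ++ [line]),
                      pvKeys_insert_val sa.tb u (sa.cl ++ [line]) sa.cl, ← hsave' sa.cl]
                  exact hnd
            · rw [if_neg (by simp [hmode] :
                    ¬ (sa.mode == some "table" && pvTruthy sa.ct) = true),
                  if_neg (by simp [hm, hmode] : ¬ (sb.mode == some "table"
                    && !(sb.ct.getD "" == "") && PySem.Str.startswith line "  - ") = true)]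
              split <;> try split
              all_goals exact ⟨hm, hct, htc, hnd⟩

theorem pvFold_inv (lines : List String) (sa : PvStA) (sb : PvStB) (h : pvInv sa sb) :
    pvInv (lines.foldl pvStepA sa) (lines.foldl pvStepB sb) := by
  induction lines generalizing sa sb with
  | nil => exact h
  | cons l t ih => exact ih _ _ (pvStep_inv _ _ _ h)

theorem pvFoldIns_eq_update {ν : Type} (cn : PySem.Dict String ν) (ps : List (String × ν)) :
    ps.foldl (fun cn q => cn.insert q.1 q.2) cn = cn.update ps := rfl

theorem pvValues_colsOf (d : PySem.Dict String (List String)) :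
    (pvColsOf d).values = d.items.map (fun p => PySem.Dict.ofList (pvPairs p.2)) := by
  simp [pvColsOf, PySem.Dict.values, List.map_map, Function.comp]

theorem pvColsOf_eq_foldl (d : PySem.Dict String (List String)) (hnd : d.keys.Nodup) :
    d.items.foldl (fun tc p => tc.insert p.1 (PySem.Dict.ofList (pvPairs p.2)))
      PySem.Dict.empty = pvColsOf d := by
  apply PySem.Dict.ext
  rw [PySem.Dict.items_foldl_insert_fresh d.items (fun p => p.1)
        (fun p => PySem.Dict.ofList (pvPairs p.2)) PySem.Dict.empty
        (by intro a _; simp) (by simpa [PySem.Dict.keys] using hnd)]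
  rfl

theorem pvResA (items : List (String × List String)) (cn : PySem.Dict String String)
    (tc : PySem.Dict String (PySem.Dict String String)) :
    items.foldl
      (fun (acc : PySem.Dict String String × PySem.Dict String (PySem.Dict String String)) p =>
        ((p.2.foldl
          (fun (a : PySem.Dict String String × PySem.Dict String String) line =>
            if PySem.Str.startswith line "  - " then
              (a.1.insert (PySem.Str.lower (pvParseCol line)) (pvParseCol line),
               a.2.insert (PySem.Str.lower (pvParseCol line)) (pvParseCol line))
            else a)
          (acc.1, PySem.Dict.empty)).1,
         acc.2.insert p.1
          (p.2.foldl
            (fun (a : PySem.Dict String String × PySem.Dict String String) line =>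
              if PySem.Str.startswith line "  - " then
                (a.1.insert (PySem.Str.lower (pvParseCol line)) (pvParseCol line),
                 a.2.insert (PySem.Str.lower (pvParseCol line)) (pvParseCol line))
              else a)
            (acc.1, PySem.Dict.empty)).2))
      (cn, tc)
    = (items.foldl (fun cn p => cn.update (pvPairs p.2)) cn,
       items.foldl (fun tc p => tc.insert p.1 (PySem.Dict.ofList (pvPairs p.2))) tc) := by
  induction items generalizing cn tc with
  | nil => rfl
  | cons p t ih =>
      simp only [List.foldl_cons]
      rw [pvInnerA]
      exact ih _ _

-- ===== VERDICT (by name: the statement is the Claim_ definition above) =====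
theorem schema_identifiers_py_spec : Claim_equal_schema_identifiers_py := by
  intro s _
  have H := pvFold_inv (PySem.Str.splitlines s)
    { tb := PySem.Dict.empty, rels := [], notes := [], ct := none, cl := [], mode := none }
    { tc := PySem.Dict.empty, ct := none, mode := none }
    ⟨rfl, rfl, rfl, PySem.Dict.nodup_keys_empty⟩
  obtain ⟨-, -, htc, hnd⟩ := H
  show schema_identifiers_py s = schema_identifiers_py_alt s
  unfold schema_identifiers_py schema_identifiers_py_alt pvParseBlocks
  dsimp only
  rw [pvResA, htc, pvKeys_colsOf, pvValues_colsOf, List.foldl_map, pvColsOf_eq_foldl _ hnd]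
  simp only [pvFoldIns_eq_update, pvUpdate_ofList_items]
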